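-- pv_equiv track=rewrite | github.com/Independent-Society-of-Knowledge/LecturePipeline | lecturePipeline/typography/fonts/typography.py | split_text_to_char_number_strictly
-- ===== SOURCE A (Python) =====
-- def split_text_to_char_number_strictly(text: str, char_num: float) -> list[str]:
--     """Split text into lines with a strict character limit,
--     breaking words with a hyphen if they exceed the limit."""
--     words = text.split()
--     lines = []
--     current_line = []
--     current_width = 0
--
--     for word in words:
--         # If the entire word is longer than char_num
--         if len(word) > char_num:
--             # Break the long word
--             for i in range(0, len(word), char_num):
--                 # Last segment
--                 if i + char_num >= len(word):
--                     segment = word[i:]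
--                     # If current line has space, add to current line
--                     if current_line and current_width + len(segment) + 1 <= char_num:
--                         current_line.append(segment)
--                         current_width += len(segment) + 1
--                     else:
--                         # Start new line
--                         if current_line:
--                             lines.append(" ".join(current_line))
--                         current_line = [segment]
--                         current_width = len(segment)
--                 else:
--                     # Middle segments
--                     segment = word[i:i+char_num] + "-"
--                     # If current line has space, add to current line
--                     if current_line and current_width + len(segment) + 1 <= char_num:
--                         current_line.append(segment)
--                         current_width += len(segment) + 1
--                     else:
--                         # Start new line
--                         if current_line:
--                             lines.append(" ".join(current_line))
--                         current_line = [segment]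
--                         current_width = len(segment)
--         else:
--             # Normal word handling
--             # Check if adding this word would exceed max_width
--             if current_width + len(word) + (1 if current_line else 0) <= char_num:
--                 current_line.append(word)
--                 current_width += len(word) + (1 if current_line else 0)
--             else:
--                 # Start a new line
--                 lines.append(" ".join(current_line))
--                 current_line = [word]
--                 current_width = len(word)
--
--     # Add the last line if it exists
--     if current_line:
--         lines.append(" ".join(current_line))
--
--     return lines
-- ===== SOURCE B (Python) =====
-- def split_text_to_char_number_strictly(text: str, char_num: float) -> list[str]:
--     """Split text into lines with a strict character limit,
--     breaking words with a hyphen if they exceed the limit."""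
--     # Pass 1: flatten the text into tokens (whole words, or hyphenated chunks of long words).
--     tokens = []
--     for word in text.split():
--         if len(word) > char_num:
--             for i in range(0, len(word), char_num):
--                 if i + char_num >= len(word):
--                     tokens.append(word[i:])
--                 else:
--                     tokens.append(word[i:i + char_num] + "-")
--         else:
--             tokens.append(word)
--     # Pass 2: one uniform greedy packing of the tokens into lines.
--     lines = []
--     current_line = []
--     current_width = 0
--     for token in tokens:
--         if current_width + len(token) + (1 if current_line else 0) <= char_num:
--             current_line.append(token)
--             current_width += len(token) + 1
--         else:
--             if current_line:
--                 lines.append(" ".join(current_line))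
--             current_line = [token]
--             current_width = len(token)
--     if current_line:
--         lines.append(" ".join(current_line))
--     return lines
-- ===== Notes on version B (the rewrite author's own statement) =====
-- stated objective: simpler
-- what changed: A interleaves hyphenation and line packing in two nested loops with four duplicated packing branches; B first flattens the text into a token list (whole words plus hyphenated chunks of long words) and then packs the tokens into lines with one uniform greedy step.
import Mathlib
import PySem

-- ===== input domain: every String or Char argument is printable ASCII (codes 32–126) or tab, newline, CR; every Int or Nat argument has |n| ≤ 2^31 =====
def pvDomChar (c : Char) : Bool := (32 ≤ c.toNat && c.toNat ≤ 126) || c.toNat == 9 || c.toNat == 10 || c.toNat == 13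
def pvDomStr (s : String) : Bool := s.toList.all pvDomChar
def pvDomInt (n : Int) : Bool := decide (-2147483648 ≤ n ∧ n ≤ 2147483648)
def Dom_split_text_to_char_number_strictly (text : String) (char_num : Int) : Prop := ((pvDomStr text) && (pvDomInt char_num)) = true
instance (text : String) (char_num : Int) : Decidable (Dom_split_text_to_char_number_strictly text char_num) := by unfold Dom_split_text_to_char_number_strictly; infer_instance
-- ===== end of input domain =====

-- B replaces A's four duplicated packing branches spread over two nested loops by a flat
-- tokenize-then-pack decomposition (objective: simpler); return values proved equal on Pre_.

-- state: (lines, current_line, current_width)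
def pvSt : Type := List String × List (List Char) × Int

def pvJoin (cur : List (List Char)) : String := String.ofList (PySem.Chars.join [' '] cur)

-- ===== PORT A =====
-- inner loop body: `for i in range(0, len(word), char_num)` of the long-word branch
def pvSegStepA (c : Int) (word : List Char) (st : pvSt) (i : Int) : pvSt :=
  if i + c ≥ (word.length : Int) then
    -- last segment
    let seg := PySem.Chars.slice word (some i) none
    if st.2.1 ≠ [] ∧ st.2.2 + (seg.length : Int) + 1 ≤ c then
      (st.1, st.2.1 ++ [seg], st.2.2 + (seg.length : Int) + 1)
    else
      ((if st.2.1 ≠ [] then st.1 ++ [pvJoin st.2.1] else st.1), [seg], (seg.length : Int))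
  else
    -- middle segment
    let seg := PySem.Chars.slice word (some i) (some (i + c)) ++ ['-']
    if st.2.1 ≠ [] ∧ st.2.2 + (seg.length : Int) + 1 ≤ c then
      (st.1, st.2.1 ++ [seg], st.2.2 + (seg.length : Int) + 1)
    else
      ((if st.2.1 ≠ [] then st.1 ++ [pvJoin st.2.1] else st.1), [seg], (seg.length : Int))

-- outer loop body: one `word`
def pvWordStepA (c : Int) (st : pvSt) (word : List Char) : pvSt :=
  if c < (word.length : Int) then
    (PySem.List.pyRange 0 (word.length : Int) c).foldl (pvSegStepA c word) st
  else
    if st.2.2 + (word.length : Int) + (if st.2.1 ≠ [] then 1 else 0) ≤ c then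
      -- width bonus is computed AFTER the append in Python, so it is always 1 here
      (st.1, st.2.1 ++ [word], st.2.2 + (word.length : Int) + 1)
    else
      (st.1 ++ [pvJoin st.2.1], [word], (word.length : Int))

def split_text_to_char_number_strictly (text : String) (char_num : Int) : List String :=
  let words := PySem.Chars.split₀ text.toList
  let st := words.foldl (pvWordStepA char_num) ([], [], 0)
  if st.2.1 ≠ [] then st.1 ++ [pvJoin st.2.1] else st.1

-- ===== PORT B =====
-- pass 1: the token stream of one word (whole word, or hyphenated chunks)
def pvSeg (c : Int) (word : List Char) (i : Int) : List Char :=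
  if i + c ≥ (word.length : Int) then PySem.Chars.slice word (some i) none
  else PySem.Chars.slice word (some i) (some (i + c)) ++ ['-']

def pvTokens (c : Int) (word : List Char) : List (List Char) :=
  if c < (word.length : Int) then (PySem.List.pyRange 0 (word.length : Int) c).map (pvSeg c word)
  else [word]

-- pass 2: one uniform greedy packing step
def pvPackStep (c : Int) (st : pvSt) (t : List Char) : pvSt :=
  if st.2.2 + (t.length : Int) + (if st.2.1 ≠ [] then 1 else 0) ≤ c then
    (st.1, st.2.1 ++ [t], st.2.2 + (t.length : Int) + 1)
  else
    ((if st.2.1 ≠ [] then st.1 ++ [pvJoin st.2.1] else st.1), [t], (t.length : Int))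

def split_text_to_char_number_strictly_alt (text : String) (char_num : Int) : List String :=
  let toks := (PySem.Chars.split₀ text.toList).flatMap (pvTokens char_num)
  let st := toks.foldl (pvPackStep char_num) ([], [], 0)
  if st.2.1 ≠ [] then st.1 ++ [pvJoin st.2.1] else st.1

-- ===== PRECONDITION & SPEC =====
-- Pre_ excludes only char_num = 0 with at least one word, where Python A raises
-- ValueError from range(0, len(word), 0) (B raises the same way).
def Pre_split_text_to_char_number_strictly (text : String) (char_num : Int) : Prop :=
  char_num ≠ 0 ∨ PySem.Chars.split₀ text.toList = []
instance (text : String) (char_num : Int) : Decidable (Pre_split_text_to_char_number_strictly text char_num) := by unfold Pre_split_text_to_char_number_strictly; infer_instance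

def pvWitness_split_text_to_char_number_strictly : String × Int := ("hello wonderful world", 7)

def Spec_split_text_to_char_number_strictly (text : String) (char_num : Int) (out : List String) : Prop := out = split_text_to_char_number_strictly_alt text char_num
instance (text : String) (char_num : Int) (out : List String) : Decidable (Spec_split_text_to_char_number_strictly text char_num out) := by unfold Spec_split_text_to_char_number_strictly; infer_instance

-- ===== CLAIM (what is proved, stated in full; the proofs are below) =====
def Claim_equal_split_text_to_char_number_strictly : Prop := ∀ (text : String) (char_num : Int), Dom_split_text_to_char_number_strictly text char_num → Pre_split_text_to_char_number_strictly text char_num → Spec_split_text_to_char_number_strictly text char_num (split_text_to_char_number_strictly text char_num)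

-- ===== LEMMAS AND PROOFS =====

-- loop invariant: an empty current line has width 0, and the width is never negative
def pvInv (st : pvSt) : Prop := (st.2.1 = [] → st.2.2 = 0) ∧ 0 ≤ st.2.2

theorem pvPack_inv (c : Int) (st : pvSt) (t : List Char) (h : pvInv st) :
    pvInv (pvPackStep c st t) := by
  obtain ⟨h1, h2⟩ := h
  unfold pvInv pvPackStep
  split_ifs with hc <;> constructor <;> simp <;> positivity

-- once the current line is nonempty, A's inner segment step IS the uniform packing step
theorem pvSegStepA_eq (c : Int) (word : List Char) (st : pvSt) (i : Int)
    (h : st.2.1 ≠ []) : pvSegStepA c word st i = pvPackStep c st (pvSeg c word i) := by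
  unfold pvSegStepA pvPackStep pvSeg
  split_ifs <;> simp_all

-- the packing step never leaves an empty current line
theorem pvPack_ne (c : Int) (st : pvSt) (t : List Char) : (pvPackStep c st t).2.1 ≠ [] := by
  unfold pvPackStep; split_ifs <;> simp

-- fold form of the two previous facts
theorem pvFold_seg_eq (c : Int) (word : List Char) (l : List Int) (st : pvSt)
    (h : st.2.1 ≠ []) :
    l.foldl (pvSegStepA c word) st = (l.map (pvSeg c word)).foldl (pvPackStep c) st := by
  induction l generalizing st with
  | nil => rfl
  | cons i l ih =>
      simp only [List.foldl_cons, List.map_cons]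
      rw [pvSegStepA_eq c word st i h, ih _ (pvPack_ne c st _)]

theorem pvRange_nonpos (n c : Int) (hn : 0 ≤ n) (hc : c ≤ 0) :
    PySem.List.pyRange 0 n c = [] := by
  unfold PySem.List.pyRange
  split_ifs <;> simp_all <;> omega

-- the long-word inner loop of A equals packing the word's token stream
theorem pvLong_eq (c : Int) (word : List Char) (st : pvSt)
    (hlen : c < (word.length : Int)) (hinv : pvInv st) :
    (PySem.List.pyRange 0 (word.length : Int) c).foldl (pvSegStepA c word) st
      = ((PySem.List.pyRange 0 (word.length : Int) c).map (pvSeg c word)).foldl (pvPackStep c) st := by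
  by_cases hc : c ≤ 0
  · rw [pvRange_nonpos _ _ (by positivity) hc]; rfl
  · replace hc : 0 < c := by omega -- c > 0: the range is 0 :: rest, and the first segment is a middle chunk of length c+1
    have h0 : (0:Int) < (word.length : Int) := lt_trans hc hlen
    rw [PySem.List.pyRange_of_pos 0 (word.length : Int) hc]
    simp only [if_pos h0, sub_zero]
    set cnt := (((word.length : Int) + c - 1) / c).toNat with hcnt
    have hcntpos : 0 < cnt := by
      rw [hcnt]
      have : (1:Int) ≤ ((word.length : Int) + c - 1) / c := by
        rw [Int.le_ediv_iff_mul_le hc]; omega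
      omega
    obtain ⟨m, hm⟩ := Nat.exists_eq_succ_of_ne_zero (Nat.pos_iff_ne_zero.mp hcntpos)
    rw [hm, List.range_succ_eq_map]
    simp only [List.map_cons, List.foldl_cons]
    have hfirst : (0:Int) + c * ((0:Nat):Int) = 0 := by simp
    rw [hfirst]
    rcases eq_or_ne st.2.1 [] with hemp | hne
    · -- empty current line: both sides start a new line with the first (middle) chunk
      have hw0 : st.2.2 = 0 := hinv.1 hemp
      have hmid : ¬ ((0:Int) + c ≥ (word.length : Int)) := by omega
      have hseglen : (PySem.Chars.slice word (some 0) (some ((0:Int) + c)) ++ ['-']).length = c.toNat + 1 := by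
        simp only [zero_add, List.length_append, List.length_cons, List.length_nil]
        rw [PySem.Chars.slice_eq_listSlice, PySem.List.slice_zero_start,
            PySem.List.slice_to _ (le_of_lt hc), List.length_take]
        omega
      have hstep : pvSegStepA c word st 0 = pvPackStep c st (pvSeg c word 0) := by
        unfold pvSegStepA pvPackStep pvSeg
        rw [if_neg hmid, if_neg hmid]
        have hA : ¬ (st.2.1 ≠ [] ∧ st.2.2 + (((PySem.Chars.slice word (some 0) (some ((0:Int) + c)) ++ ['-']).length : Nat) : Int) + 1 ≤ c) := by
          simp [hemp]
        have hB : ¬ (st.2.2 + (((PySem.Chars.slice word (some 0) (some ((0:Int) + c)) ++ ['-']).length : Nat) : Int) + (if st.2.1 ≠ [] then 1 else 0) ≤ c) := by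
          rw [hseglen]; simp [hemp, hw0]
        rw [if_neg hA]
        rw [if_neg hB]
      have hne' : (pvSegStepA c word st 0).2.1 ≠ [] := by
        rw [hstep]; exact pvPack_ne c st _
      rw [hstep, pvFold_seg_eq c word _ _ (by rw [← hstep]; exact hne')]
    · rw [pvSegStepA_eq c word st 0 hne, pvFold_seg_eq c word _ _ (pvPack_ne c st _)]

-- A's per-word step equals packing the word's token stream
theorem pvWord_eq (c : Int) (st : pvSt) (word : List Char) (hinv : pvInv st) :
    pvWordStepA c st word = (pvTokens c word).foldl (pvPackStep c) st := by
  unfold pvWordStepA pvTokens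
  rcases lt_or_ge c (word.length : Int) with hlen | hlen
  · rw [if_pos hlen, if_pos hlen, pvLong_eq c word st hlen hinv]
  · rw [if_neg (not_lt.mpr hlen), if_neg (not_lt.mpr hlen)]
    simp only [List.foldl_cons, List.foldl_nil]
    unfold pvPackStep
    rcases eq_or_ne st.2.1 [] with hemp | hne
    · have hfits : st.2.2 + (word.length : Int) + (if st.2.1 ≠ [] then 1 else 0) ≤ c := by
        rw [hinv.1 hemp]; simp [hemp]; omega
      rw [if_pos hfits, if_pos hfits]
    · split_ifs <;> simp_all

theorem pvFold_inv (c : Int) (ts : List (List Char)) (st : pvSt) (hinv : pvInv st) :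
    pvInv (ts.foldl (pvPackStep c) st) := by
  induction ts generalizing st with
  | nil => exact hinv
  | cons t ts ih => exact ih _ (pvPack_inv c st t hinv)

theorem pvMain (c : Int) (ws : List (List Char)) (st : pvSt) (hinv : pvInv st) :
    ws.foldl (pvWordStepA c) st = (ws.flatMap (pvTokens c)).foldl (pvPackStep c) st := by
  induction ws generalizing st with
  | nil => rfl
  | cons w ws ih =>
      simp only [List.foldl_cons, List.flatMap_cons, List.foldl_append]
      rw [pvWord_eq c st w hinv, ih _ (pvFold_inv c _ st hinv)]

-- ===== VERDICT (by name: the statement is the Claim_ definition above) =====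
theorem split_text_to_char_number_strictly_spec : Claim_equal_split_text_to_char_number_strictly := by
  intro text char_num _ _
  unfold Spec_split_text_to_char_number_strictly
  unfold split_text_to_char_number_strictly split_text_to_char_number_strictly_alt
  dsimp only
  rw [pvMain char_num _ _ ⟨fun _ => rfl, le_refl 0⟩]
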